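-- pv_equiv track=rewrite | github.com/ahk1221/code-cipher | playfair.py | DecryptRowRule
-- ===== SOURCE A (Python) =====
-- def SearchkeyMatrix(letter, keyMatrix):
--     for row in range(5):
--         for column in range(5):
--             if keyMatrix[row][column] == letter:
--                 return row, column
--
--     return -1, -1
--
-- def DecryptRowRule(diagraph, keyMatrix):
--     newDiagraph = ''
--     for i in range(len(diagraph)):
--         row, column = SearchkeyMatrix(diagraph[i], keyMatrix)
--
--         if column == 0:
--             newDiagraph += keyMatrix[row][4]
--         else:
--             newDiagraph += keyMatrix[row][column - 1]
--
--     return newDiagraph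
-- ===== SOURCE B (Python) =====
-- def DecryptRowRule(diagraph, keyMatrix):
--     if not diagraph:
--         return ''
--     # One scan of the 5x5 block builds the whole letter->letter shift table
--     # (left neighbour, wrapping column 0 to column 4; first occurrence wins),
--     # then the text is mapped in a single lookup pass.
--     table = {}
--     for r in range(5):
--         row = keyMatrix[r]
--         for c in range(5):
--             L = row[c]
--             if L not in table:
--                 table[L] = row[4] if c == 0 else row[c - 1]
--     return ''.join(table[ch] for ch in diagraph)
-- ===== Notes on version B (the rewrite author's own statement) =====
-- stated objective: alternative
-- what changed: B precomputes the full letter-to-letter substitution table (row-shift and first-occurrence rule folded into construction) in one scan of the 5x5 matrix and then maps the text in a single dictionary-lookup pass, instead of re-running the 25-cell nested search for every character; Pre_ excludes undersized matrices on which A returns only because every letter is found before the search hits a missing cell, and texts with a letter absent from the 5x5 block, where A's keyMatrix[-1][-2] value is a negative-index artefact of the (-1,-1) sentinel and B's lookup raises KeyError.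
-- outside the precondition, e.g. on DecryptRowRule('a', [['x', 'a']]): A returns 'x', B raises IndexError
import Mathlib
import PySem

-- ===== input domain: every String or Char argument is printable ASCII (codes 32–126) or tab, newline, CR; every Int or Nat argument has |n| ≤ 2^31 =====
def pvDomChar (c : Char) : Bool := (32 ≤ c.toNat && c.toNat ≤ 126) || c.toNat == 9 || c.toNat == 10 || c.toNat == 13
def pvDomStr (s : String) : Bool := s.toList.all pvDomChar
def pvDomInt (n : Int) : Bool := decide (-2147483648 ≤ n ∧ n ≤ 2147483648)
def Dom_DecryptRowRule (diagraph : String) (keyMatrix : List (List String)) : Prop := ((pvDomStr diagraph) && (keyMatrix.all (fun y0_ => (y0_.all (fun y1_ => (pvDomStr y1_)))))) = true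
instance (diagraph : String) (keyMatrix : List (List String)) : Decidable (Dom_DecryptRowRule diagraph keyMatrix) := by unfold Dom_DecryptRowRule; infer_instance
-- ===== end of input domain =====

-- B builds the whole letter→letter shift table in one scan of the 5×5 matrix and then maps the
-- text in a single lookup pass, instead of re-running the 25-cell search per character.

-- ===== PORT A =====
-- inner 'for column in range(5)': some (some c) = found at column c, some none = not in this row, none = IndexError
def pvSearchRowA (letter : String) (row : List String) : List Int → Option (Option Int)
  | [] => some none
  | c :: rest =>
    match PySem.List.pyGet? row c with
    | none => none
    | some cell => if cell = letter then some (some c) else pvSearchRowA letter row rest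

-- outer 'for row in range(5)' of SearchkeyMatrix; (-1,-1) = not found, none = IndexError
def pvSearchA (letter : String) (km : List (List String)) : List Int → Option (Int × Int)
  | [] => some (-1, -1)
  | r :: rest =>
    match PySem.List.pyGet? km r with
    | none => none
    | some row =>
      match pvSearchRowA letter row (PySem.List.pyRange 0 5 1) with
      | none => none
      | some (some c) => some (r, c)
      | some none => pvSearchA letter km rest

-- the main 'for i in range(len(diagraph))' loop, accumulating newDiagraph
def pvDecA (km : List (List String)) : List Char → String → Option String
  | [], acc => some acc
  | ch :: rest, acc =>
    match pvSearchA (String.ofList [ch]) km (PySem.List.pyRange 0 5 1) with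
    | none => none
    | some (r, c) =>
      match (if c = 0
             then (PySem.List.pyGet? km r).bind (fun row => PySem.List.pyGet? row 4)
             else (PySem.List.pyGet? km r).bind (fun row => PySem.List.pyGet? row (c - 1))) with
      | none => none
      | some s => pvDecA km rest (acc ++ s)

def DecryptRowRule (diagraph : String) (keyMatrix : List (List String)) : String :=
  (pvDecA keyMatrix diagraph.toList "").getD ""

-- ===== PORT B =====
-- inner 'for c in range(5)' of the table-building pass (first occurrence wins)
def pvBuildRowB (row : List String) (t : PySem.Dict String String) : List Int → Option (PySem.Dict String String)
  | [] => some t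
  | c :: rest =>
    match PySem.List.pyGet? row c with
    | none => none
    | some L =>
      if (t.get? L).isSome then pvBuildRowB row t rest
      else
        match PySem.List.pyGet? row (if c = 0 then (4 : Int) else c - 1) with
        | none => none
        | some v => pvBuildRowB row (t.insert L v) rest

-- outer 'for r in range(5)' of the table-building pass
def pvBuildB (km : List (List String)) (t : PySem.Dict String String) : List Int → Option (PySem.Dict String String)
  | [] => some t
  | r :: rest =>
    match PySem.List.pyGet? km r with
    | none => none
    | some row =>
      match pvBuildRowB row t (PySem.List.pyRange 0 5 1) with
      | none => none
      | some t' => pvBuildB km t' rest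

-- the mapping pass: a plain table lookup (none = KeyError)
def pvMapB (t : PySem.Dict String String) : List Char → Option (List String)
  | [] => some []
  | ch :: rest =>
    match t.get? (String.ofList [ch]) with
    | none => none
    | some p => (pvMapB t rest).map (p :: ·)

def DecryptRowRule_alt (diagraph : String) (keyMatrix : List (List String)) : String :=
  if diagraph = "" then ""
  else
    match pvBuildB keyMatrix PySem.Dict.empty (PySem.List.pyRange 0 5 1) with
    | none => ""
    | some t =>
      match pvMapB t diagraph.toList with
      | none => ""
      | some parts => PySem.Str.join "" parts

-- ===== PRECONDITION & SPEC =====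
-- Pre_ excludes (a) undersized matrices, on which A returns only because every letter of the text
-- happens to be found before the nested search reaches a missing cell, and (b) texts containing a
-- letter absent from the 5×5 block, where A's keyMatrix[-1][-2] value is a negative-index artefact
-- of SearchkeyMatrix's (-1,-1) sentinel and B's table lookup raises KeyError (cites in claim.json).
def Pre_DecryptRowRule (diagraph : String) (keyMatrix : List (List String)) : Prop :=
  diagraph = "" ∨
  (5 ≤ keyMatrix.length ∧ (∀ r ∈ keyMatrix.take 5, 5 ≤ r.length) ∧
   ∀ ch ∈ diagraph.toList, ∃ row ∈ keyMatrix.take 5, String.ofList [ch] ∈ row.take 5)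
instance (diagraph : String) (keyMatrix : List (List String)) : Decidable (Pre_DecryptRowRule diagraph keyMatrix) := by
  unfold Pre_DecryptRowRule; infer_instance

def pvWitness_DecryptRowRule : String × List (List String) := ("", [])

def Spec_DecryptRowRule (diagraph : String) (keyMatrix : List (List String)) (out : String) : Prop := out = DecryptRowRule_alt diagraph keyMatrix
instance (diagraph : String) (keyMatrix : List (List String)) (out : String) : Decidable (Spec_DecryptRowRule diagraph keyMatrix out) := by unfold Spec_DecryptRowRule; infer_instance

-- ===== CLAIM (what is proved, stated in full; the proofs are below) =====
def Claim_equal_DecryptRowRule : Prop := ∀ (diagraph : String) (keyMatrix : List (List String)), Dom_DecryptRowRule diagraph keyMatrix → Pre_DecryptRowRule diagraph keyMatrix → Spec_DecryptRowRule diagraph keyMatrix (DecryptRowRule diagraph keyMatrix)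

-- ===== LEMMAS AND PROOFS =====

-- join with empty separator peels off the head
theorem pvJoin_empty_cons (p : String) (ps : List String) :
    PySem.Str.join "" (p :: ps) = p ++ PySem.Str.join "" ps := by
  show String.ofList (PySem.Chars.join [] (p.toList :: ps.map String.toList)) = _
  have h : ∀ (a : List Char) (bs : List (List Char)),
      PySem.Chars.join [] (a :: bs) = a ++ PySem.Chars.join [] bs := by
    intro a bs
    cases bs with
    | nil => simp [PySem.Chars.join, List.intercalate]
    | cons b bs => simp [PySem.Chars.join, List.intercalate, List.intersperse]
  rw [h]; simp [PySem.Str.join]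

-- a cell index the inner loop uses, together with its shifted partner, is in range
def pvCellOK (row : List String) (c : Int) : Prop :=
  (PySem.List.pyGet? row c).isSome ∧
  (PySem.List.pyGet? row (if c = 0 then (4 : Int) else c - 1)).isSome

theorem pvCellOK_of_shape (row : List String) (h5 : 5 ≤ row.length) (c : Int)
    (h0 : 0 ≤ c) (hc : c < 5) : pvCellOK row c := by
  have hlen : (5 : Int) ≤ (row.length : Int) := by exact_mod_cast h5
  constructor
  · rw [PySem.List.pyGet?_eq_some_getElem row h0 (by omega)]; simp
  · have h0' : (0:Int) ≤ (if c = 0 then (4 : Int) else c - 1) := by split_ifs <;> omega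
    have hc' : (if c = 0 then (4 : Int) else c - 1) < (row.length : Int) := by split_ifs <;> omega
    rw [PySem.List.pyGet?_eq_some_getElem row h0' hc']; simp

theorem pvSearchRowA_isSome (L : String) (row : List String) (cols : List Int)
    (hc : ∀ c ∈ cols, pvCellOK row c) : ∃ o, pvSearchRowA L row cols = some o := by
  induction cols with
  | nil => exact ⟨none, rfl⟩
  | cons c rest ih =>
    obtain ⟨x, hx⟩ := Option.isSome_iff_exists.mp (hc c (by simp)).1
    by_cases hxL : x = L
    · exact ⟨some c, by simp [pvSearchRowA, hx, hxL]⟩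
    · obtain ⟨o, ho⟩ := ih (fun c hm => hc c (by simp [hm]))
      exact ⟨o, by simp [pvSearchRowA, hx, hxL, ho]⟩

theorem pvSearchRowA_mem (L : String) (row : List String) (cols : List Int) (c : Int)
    (h : pvSearchRowA L row cols = some (some c)) : c ∈ cols := by
  induction cols with
  | nil => simp [pvSearchRowA] at h
  | cons c' rest ih =>
    simp only [pvSearchRowA] at h
    cases hx : PySem.List.pyGet? row c' with
    | none => rw [hx] at h; simp at h
    | some x =>
      rw [hx] at h
      by_cases hxL : x = L
      · simp [hxL] at h; simp [h]
      · simp only [hxL, if_false] at h; exact List.mem_cons_of_mem _ (ih h)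

-- when the letter really occurs at some listed column, the inner search finds a column
theorem pvSearchRowA_found (L : String) (row : List String) (cols : List Int)
    (hc : ∀ c ∈ cols, pvCellOK row c)
    (hf : ∃ c ∈ cols, PySem.List.pyGet? row c = some L) :
    ∃ c', pvSearchRowA L row cols = some (some c') := by
  induction cols with
  | nil => simp at hf
  | cons c0 rest ih =>
    obtain ⟨x, hx⟩ := Option.isSome_iff_exists.mp (hc c0 (by simp)).1
    by_cases hxL : x = L
    · exact ⟨c0, by simp [pvSearchRowA, hx, hxL]⟩
    · obtain ⟨c, hcm, hcl⟩ := hf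
      have hcr : c ∈ rest := by
        rcases List.mem_cons.mp hcm with rfl | h
        · rw [hx] at hcl; simp at hcl; exact absurd hcl hxL
        · exact h
      obtain ⟨c', hc'⟩ := ih (fun c hm => hc c (by simp [hm])) ⟨c, hcr, hcl⟩
      exact ⟨c', by simp [pvSearchRowA, hx, hxL, hc']⟩

-- row-level invariant: the build pass extends t by exactly the search-determined bindings
theorem pvBuildRowB_spec (row : List String) (cols : List Int) (t : PySem.Dict String String)
    (hc : ∀ c ∈ cols, pvCellOK row c) :
    ∃ t', pvBuildRowB row t cols = some t' ∧
      ∀ L, t'.get? L =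
        match t.get? L with
        | some v => some v
        | none =>
          match pvSearchRowA L row cols with
          | some (some c) => PySem.List.pyGet? row (if c = 0 then (4 : Int) else c - 1)
          | _ => none := by
  induction cols generalizing t with
  | nil =>
    exact ⟨t, rfl, fun L => by cases h : t.get? L <;> simp [pvSearchRowA]⟩
  | cons c rest ih =>
    have hcc := hc c (by simp)
    obtain ⟨x, hx⟩ := Option.isSome_iff_exists.mp hcc.1
    have hrest : ∀ c' ∈ rest, pvCellOK row c' := fun c' hm => hc c' (by simp [hm])
    by_cases ht : (t.get? x).isSome
    · obtain ⟨t', hb, hspec⟩ := ih t hrest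
      refine ⟨t', by simp [pvBuildRowB, hx, ht, hb], fun L => ?_⟩
      rw [hspec L]
      cases hL : t.get? L with
      | some v => simp
      | none =>
        have hxL : x ≠ L := fun h => by rw [h, hL] at ht; simp at ht
        simp [pvSearchRowA, hx, hxL]
    · obtain ⟨v, hv⟩ := Option.isSome_iff_exists.mp hcc.2
      obtain ⟨t', hb, hspec⟩ := ih (t.insert x v) hrest
      refine ⟨t', by simp [pvBuildRowB, hx, ht, hv, hb], fun L => ?_⟩
      rw [hspec L, PySem.Dict.get?_insert]
      by_cases hLx : L = x
      · subst hLx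
        have hLnone : t.get? L = none := by
          cases h : t.get? L
          · rfl
          · rw [h] at ht; simp at ht
        simp [hLnone, pvSearchRowA, hx, hv]
      · have hxL : x ≠ L := fun h => hLx h.symm
        simp only [if_neg hLx]
        cases hL : t.get? L with
        | some w => simp
        | none => simp [pvSearchRowA, hx, hxL]

-- matrix-level invariant
theorem pvBuildB_spec (km : List (List String)) (rows : List Int) (t : PySem.Dict String String)
    (hr : ∀ r ∈ rows, 0 ≤ r ∧ ∃ row, PySem.List.pyGet? km r = some row ∧ 5 ≤ row.length) :
    ∃ T, pvBuildB km t rows = some T ∧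
      ∀ L, T.get? L =
        match t.get? L with
        | some v => some v
        | none =>
          match pvSearchA L km rows with
          | some (r, c) =>
            if r = -1 then none
            else (PySem.List.pyGet? km r).bind
                   (fun row => PySem.List.pyGet? row (if c = 0 then (4 : Int) else c - 1))
          | none => none := by
  induction rows generalizing t with
  | nil =>
    exact ⟨t, rfl, fun L => by cases h : t.get? L <;> simp [pvSearchA]⟩
  | cons r rest ih =>
    obtain ⟨hr0, row, hrow, h5⟩ := hr r (by simp)
    have hc : ∀ c ∈ PySem.List.pyRange 0 5 1, pvCellOK row c := by
      have h15 : PySem.List.pyRange 0 5 1 = [0,1,2,3,4] := by decide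
      rw [h15]; intro c hm
      have : c = 0 ∨ c = 1 ∨ c = 2 ∨ c = 3 ∨ c = 4 := by simpa using hm
      rcases this with h|h|h|h|h <;> subst h <;> exact pvCellOK_of_shape row h5 _ (by omega) (by omega)
    obtain ⟨t₁, hb1, hs1⟩ := pvBuildRowB_spec row (PySem.List.pyRange 0 5 1) t hc
    obtain ⟨T, hbT, hsT⟩ := ih t₁ (fun r' hm => hr r' (by simp [hm]))
    refine ⟨T, by simp [pvBuildB, hrow, hb1, hbT], fun L => ?_⟩
    rw [hsT L, hs1 L]
    cases hL : t.get? L with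
    | some v => simp
    | none =>
      simp only []
      obtain ⟨o, ho⟩ := pvSearchRowA_isSome L row (PySem.List.pyRange 0 5 1) hc
      cases o with
      | some c =>
        have hcmem := pvSearchRowA_mem L row _ c ho
        have hshift := (hc c hcmem).2
        obtain ⟨w, hw⟩ := Option.isSome_iff_exists.mp hshift
        have hrne : r ≠ -1 := by omega
        simp [ho, hw, pvSearchA, hrow, hrne]
      | none =>
        simp [ho, pvSearchA, hrow]

-- when the letter occurs somewhere in the listed rows, the search returns a real position
theorem pvSearchA_found (L : String) (km : List (List String)) (rows : List Int)
    (hr : ∀ r ∈ rows, 0 ≤ r ∧ ∃ row, PySem.List.pyGet? km r = some row ∧ 5 ≤ row.length)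
    (hf : ∃ r ∈ rows, ∃ row, PySem.List.pyGet? km r = some row ∧
            ∃ c ∈ PySem.List.pyRange 0 5 1, PySem.List.pyGet? row c = some L) :
    ∃ r c, pvSearchA L km rows = some (r, c) ∧ 0 ≤ r ∧
      ((PySem.List.pyGet? km r).bind
        (fun row => PySem.List.pyGet? row (if c = 0 then (4 : Int) else c - 1))).isSome := by
  induction rows with
  | nil => simp at hf
  | cons r0 rest ih =>
    obtain ⟨hr0, row0, hrow0, h5⟩ := hr r0 (by simp)
    have hc : ∀ c ∈ PySem.List.pyRange 0 5 1, pvCellOK row0 c := by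
      have h15 : PySem.List.pyRange 0 5 1 = [0,1,2,3,4] := by decide
      rw [h15]; intro c hm
      have : c = 0 ∨ c = 1 ∨ c = 2 ∨ c = 3 ∨ c = 4 := by simpa using hm
      rcases this with h|h|h|h|h <;> subst h <;> exact pvCellOK_of_shape row0 h5 _ (by omega) (by omega)
    obtain ⟨o, ho⟩ := pvSearchRowA_isSome L row0 (PySem.List.pyRange 0 5 1) hc
    cases o with
    | some c =>
      refine ⟨r0, c, by simp [pvSearchA, hrow0, ho], hr0, ?_⟩
      have hcmem := pvSearchRowA_mem L row0 _ c ho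
      have := (hc c hcmem).2
      simpa [hrow0] using this
    | none =>
      obtain ⟨r, hrm, row, hrow, hcell⟩ := hf
      have hrr : r ∈ rest := by
        rcases List.mem_cons.mp hrm with rfl | h
        · rw [hrow0] at hrow
          obtain ⟨c', hc'⟩ := pvSearchRowA_found L row0 (PySem.List.pyRange 0 5 1) hc
            (by obtain ⟨c, hcm, hcl⟩ := hcell; cases Option.some_inj.mp hrow; exact ⟨c, hcm, hcl⟩)
          rw [ho] at hc'; simp at hc'
        · exact h
      obtain ⟨r', c', hp, hge, hbs⟩ := ih (fun r' hm => hr r' (by simp [hm])) ⟨r, hrr, row, hrow, hcell⟩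
      exact ⟨r', c', by simp [pvSearchA, hrow0, ho, hp], hge, hbs⟩

-- per-character agreement of the two main loops (every character occurs in the 5×5 block)
theorem pvPiece_eq (km : List (List String)) (T : PySem.Dict String String)
    (hT : ∀ L, T.get? L =
        match pvSearchA L km (PySem.List.pyRange 0 5 1) with
        | some (r, c) =>
          if r = -1 then none
          else (PySem.List.pyGet? km r).bind
                 (fun row => PySem.List.pyGet? row (if c = 0 then (4 : Int) else c - 1))
        | none => none)
    (hr : ∀ r ∈ PySem.List.pyRange 0 5 1, 0 ≤ r ∧ ∃ row, PySem.List.pyGet? km r = some row ∧ 5 ≤ row.length)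
    (chs : List Char)
    (hf : ∀ ch ∈ chs, ∃ r ∈ PySem.List.pyRange 0 5 1, ∃ row, PySem.List.pyGet? km r = some row ∧
            ∃ c ∈ PySem.List.pyRange 0 5 1, PySem.List.pyGet? row c = some (String.ofList [ch]))
    (acc : String) :
    pvDecA km chs acc = (pvMapB T chs).map (fun parts => acc ++ PySem.Str.join "" parts) := by
  induction chs generalizing acc with
  | nil => simp [pvDecA, pvMapB, PySem.Str.join, PySem.Chars.join, List.intercalate]
  | cons ch rest ih =>
    obtain ⟨r, c, hp, hr0, hbs⟩ :=
      pvSearchA_found (String.ofList [ch]) km (PySem.List.pyRange 0 5 1) hr (hf ch (by simp))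
    obtain ⟨s, hs⟩ := Option.isSome_iff_exists.mp hbs
    have hrne : r ≠ -1 := by omega
    have hTc : T.get? (String.ofList [ch]) = some s := by
      rw [hT (String.ofList [ch]), hp]; simp [hrne, hs]
    have hsplit :
        (if c = 0
         then (PySem.List.pyGet? km r).bind (fun row => PySem.List.pyGet? row 4)
         else (PySem.List.pyGet? km r).bind (fun row => PySem.List.pyGet? row (c - 1))) =
        (PySem.List.pyGet? km r).bind
          (fun row => PySem.List.pyGet? row (if c = 0 then (4 : Int) else c - 1)) := by
      split_ifs with h <;> simp
    simp only [pvDecA, pvMapB, hp, hsplit, hs, hTc]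
    rw [ih (fun ch hm => hf ch (by simp [hm])) (acc ++ s)]
    cases m : pvMapB T rest with
    | none => simp
    | some parts => simp [pvJoin_empty_cons, String.append_assoc]

-- ===== VERDICT (by name: the statement is the Claim_ definition above) =====
theorem DecryptRowRule_spec : Claim_equal_DecryptRowRule := by
  intro d km hdom hpre
  unfold Spec_DecryptRowRule
  by_cases hd : d = ""
  · subst hd; simp [DecryptRowRule, DecryptRowRule_alt, pvDecA]
  rcases hpre with h | ⟨h5, hrows, hfound⟩
  · exact absurd h hd
  have hr : ∀ r ∈ PySem.List.pyRange 0 5 1,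
      0 ≤ r ∧ ∃ row, PySem.List.pyGet? km r = some row ∧ 5 ≤ row.length := by
    have h15 : PySem.List.pyRange 0 5 1 = [0,1,2,3,4] := by decide
    rw [h15]; intro r hm
    have : r = 0 ∨ r = 1 ∨ r = 2 ∨ r = 3 ∨ r = 4 := by simpa using hm
    have hlen : (5 : Int) ≤ (km.length : Int) := by exact_mod_cast h5
    rcases this with h|h|h|h|h <;> subst h <;>
      refine ⟨by omega, km[_]'(by omega), PySem.List.pyGet?_eq_some_getElem km (by omega) (by omega), ?_⟩ <;>
      · apply hrows
        rw [show km[_]'(by omega) = (km.take 5)[_]'(by simp; omega) from (List.getElem_take).symm]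
        exact List.getElem_mem _
  obtain ⟨T, hbT, hsT⟩ := pvBuildB_spec km (PySem.List.pyRange 0 5 1) PySem.Dict.empty hr
  have hT : ∀ L, T.get? L =
      match pvSearchA L km (PySem.List.pyRange 0 5 1) with
      | some (r, c) =>
        if r = -1 then none
        else (PySem.List.pyGet? km r).bind
               (fun row => PySem.List.pyGet? row (if c = 0 then (4 : Int) else c - 1))
      | none => none := by
    intro L
    have h := hsT L
    have he : (PySem.Dict.empty (κ := String) (ν := String)).get? L = none := by
      simp [PySem.Dict.empty, PySem.Dict.get?]
    rw [he] at h
    exact h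
  -- translate Pre_'s membership form into the indexed form the search lemmas use
  have hf : ∀ ch ∈ d.toList, ∃ r ∈ PySem.List.pyRange 0 5 1, ∃ row, PySem.List.pyGet? km r = some row ∧
      ∃ c ∈ PySem.List.pyRange 0 5 1, PySem.List.pyGet? row c = some (String.ofList [ch]) := by
    intro ch hch
    obtain ⟨row, hrowm, hmem⟩ := hfound ch hch
    obtain ⟨i, hi, hieq⟩ := List.getElem_of_mem hrowm
    have hmin : (List.take 5 km).length = min 5 km.length := List.length_take
    have hi5 : i < 5 := by omega
    have hikm : i < km.length := by omega
    have hrowi : km[i]'hikm = row := by rw [← hieq]; exact List.getElem_take.symm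
    obtain ⟨j, hj, hjeq⟩ := List.getElem_of_mem hmem
    have hmin' : (List.take 5 row).length = min 5 row.length := List.length_take
    have hj5 : j < 5 := by omega
    have hjrow : j < row.length := by omega
    have hcellj : row[j]'hjrow = String.ofList [ch] := by rw [← hjeq]; exact List.getElem_take.symm
    have h15 : PySem.List.pyRange 0 5 1 = [0,1,2,3,4] := by decide
    refine ⟨(i : Int), by rw [h15]; interval_cases i <;> simp, row, ?_, (j : Int), by rw [h15]; interval_cases j <;> simp, ?_⟩
    · rw [PySem.List.pyGet?_eq_some_getElem km (by positivity) (by exact_mod_cast hikm)]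
      simp [hrowi]
    · rw [PySem.List.pyGet?_eq_some_getElem row (by positivity) (by exact_mod_cast hjrow)]
      simp [hcellj]
  have hmain := pvPiece_eq km T hT hr d.toList hf ""
  unfold DecryptRowRule DecryptRowRule_alt
  rw [hmain, hbT, if_neg hd]
  cases m : pvMapB T d.toList with
  | none => simp [m]
  | some parts => simp [m]
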